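-- pv_equiv track=rewrite | github.com/eFLAWS/ESGI-L2 | AlgoAvancée/exo2204.py | doubDoublons
-- ===== SOURCE A (Python) =====
-- def doubDoublons(tab) :
--     x = False
--     y = 0
--     for i in range(len(tab)-1) :
--         for j in range(i+1,len(tab)) :
--             if tab[i] == tab[j] :
--                 if x == False and y == 1 : x = True
--                 else : y = 1
--                 break
--     if x == True : return x
--     return False
-- ===== SOURCE B (Python) =====
-- def doubDoublons(tab):
--     return len(tab) - len(set(tab)) >= 2
-- ===== Notes on version B (the rewrite author's own statement) =====
-- stated objective: faster
-- what changed: Replaced the quadratic double loop with state flags by a single set-based count: True iff len(tab) - len(set(tab)) >= 2 (the number of indices with a later equal element).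
import Mathlib
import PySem

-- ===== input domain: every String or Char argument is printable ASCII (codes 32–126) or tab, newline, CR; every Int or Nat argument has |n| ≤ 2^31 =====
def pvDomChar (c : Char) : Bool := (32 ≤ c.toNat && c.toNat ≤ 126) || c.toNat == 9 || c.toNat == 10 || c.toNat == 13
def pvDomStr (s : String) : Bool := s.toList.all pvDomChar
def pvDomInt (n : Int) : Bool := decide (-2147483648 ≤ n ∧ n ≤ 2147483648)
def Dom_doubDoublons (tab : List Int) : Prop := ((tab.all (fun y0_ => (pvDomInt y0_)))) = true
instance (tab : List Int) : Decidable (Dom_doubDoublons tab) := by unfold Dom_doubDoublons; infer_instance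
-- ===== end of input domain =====

-- B replaces A's quadratic double loop by one set-based count (len(tab) - len(set(tab)) >= 2); objective: faster.

-- ===== PORT A =====
-- inner 'for j in range(i+1, len(tab))' loop with its break: scans the index list,
-- updates the state (x, y) once at the first j with tab[i] == tab[j], then stops.
-- Indices produced by range(...) are always in bounds, so tab[i]/tab[j] is pyGetD (exact here).
def doubDoublonsInner (tab : List Int) (i : Int) : List Int → Bool × Int → Bool × Int
  | [], st => st
  | j :: js, (x, y) =>
    if PySem.List.pyGetD tab i 0 = PySem.List.pyGetD tab j 0 then
      (if x = false ∧ y = 1 then (true, y) else (x, 1))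
    else doubDoublonsInner tab i js (x, y)

def doubDoublons (tab : List Int) : Bool :=
  let st := (PySem.List.pyRange 0 ((tab.length : Int) - 1) 1).foldl
    (fun st i => doubDoublonsInner tab i (PySem.List.pyRange (i + 1) (tab.length : Int) 1) st)
    (false, (0 : Int))
  if st.1 = true then st.1 else false

-- ===== PORT B =====
def doubDoublons_alt (tab : List Int) : Bool :=
  decide ((2 : Int) ≤ (tab.length : Int) - ((PySem.Set.ofList tab).length : Int))

-- ===== PRECONDITION & SPEC =====
def Spec_doubDoublons (tab : List Int) (out : Bool) : Prop := out = doubDoublons_alt tab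
instance (tab : List Int) (out : Bool) : Decidable (Spec_doubDoublons tab out) := by unfold Spec_doubDoublons; infer_instance

-- ===== CLAIM (what is proved, stated in full; the proofs are below) =====
def Claim_equal_doubDoublons : Prop := ∀ (tab : List Int), Dom_doubDoublons tab → Spec_doubDoublons tab (doubDoublons tab)

-- ===== LEMMAS AND PROOFS =====

def pvUpd : Bool × Int → Bool × Int :=
  fun st => if st.1 = false ∧ st.2 = 1 then (true, st.2) else (st.1, 1)
theorem pvInner_any (tab : List Int) (i : Int) (js : List Int) (st : Bool × Int) :
    doubDoublonsInner tab i js st =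
      if js.any (fun j => PySem.List.pyGetD tab i 0 == PySem.List.pyGetD tab j 0) then pvUpd st else st := by
  induction js with
  | nil => simp [doubDoublonsInner]
  | cons j js ih =>
    obtain ⟨x, y⟩ := st
    by_cases h : PySem.List.pyGetD tab i 0 = PySem.List.pyGetD tab j 0
    · simp [doubDoublonsInner, h, pvUpd]
    · simp [doubDoublonsInner, h, ih]

theorem pvInner_drop (tab : List Int) (i a : Int) (ha : 0 ≤ a) (st : Bool × Int) :
    doubDoublonsInner tab i (PySem.List.pyRange a (tab.length : Int) 1) st =
      if (tab.drop a.toNat).any (fun v => PySem.List.pyGetD tab i 0 == v) then pvUpd st else st := by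
  rw [pvInner_any]
  have h := PySem.List.map_pyGetD_pyRange' (xs := tab) (a := a) (d := 0) ha
  rw [show (PySem.List.pyRange a (tab.length : Int) 1).any
        (fun j => PySem.List.pyGetD tab i 0 == PySem.List.pyGetD tab j 0)
      = ((PySem.List.pyRange a (tab.length : Int) 1).map (fun j => PySem.List.pyGetD tab j 0)).any
        (fun v => PySem.List.pyGetD tab i 0 == v) from (List.any_map).symm, h]

theorem pvFoldl_ite_upd (c : Int → Bool) (l : List Int) (st : Bool × Int) :
    l.foldl (fun st i => if c i then pvUpd st else st) st = pvUpd^[l.countP c] st := by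
  induction l generalizing st with
  | nil => simp
  | cons a l ih =>
    by_cases h : c a
    · simp [h, ih, Function.iterate_succ_apply]
    · simp [h, ih]

theorem pvIter_true (m : Nat) : pvUpd^[m] (true, (1 : Int)) = (true, 1) := by
  induction m with
  | zero => rfl
  | succ m ih => rw [Function.iterate_succ_apply, show pvUpd (true, (1:Int)) = (true, 1) from rfl, ih]

theorem pvIter_fst (m : Nat) : (pvUpd^[m] (false, (0 : Int))).1 = decide (2 ≤ m) := by
  match m with
  | 0 => rfl
  | 1 => rfl
  | (n+2) =>
    rw [Function.iterate_succ_apply, Function.iterate_succ_apply,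
      show pvUpd (false, (0:Int)) = (false, 1) from rfl,
      show pvUpd (false, (1:Int)) = (true, 1) from rfl, pvIter_true]
    simp

def pvDupIdx (tab : List Int) : Nat :=
  (List.range tab.length).countP (fun k => decide (tab.getD k 0 ∈ tab.drop (k + 1)))

theorem pvCount_eq_dupIdx (tab : List Int) :
    (PySem.List.pyRange 0 ((tab.length : Int) - 1) 1).countP
      (fun i => (tab.drop (i + 1).toNat).any (fun v => PySem.List.pyGetD tab i 0 == v)) = pvDupIdx tab := by
  rw [PySem.List.pyRange_one, List.countP_map]
  have h1 : List.countP ((fun i => (tab.drop (i + 1).toNat).any (fun v => PySem.List.pyGetD tab i 0 == v)) ∘ (fun k : Nat => (0 : Int) + k))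
      (List.range (((tab.length : Int) - 1 - 0).toNat))
      = List.countP (fun k => decide (tab.getD k 0 ∈ tab.drop (k + 1)))
        (List.range (((tab.length : Int) - 1 - 0).toNat)) := by
    apply List.countP_congr
    intro k _
    simp only [Function.comp]
    have e1 : ((0 : Int) + (k : Int) + 1).toNat = k + 1 := by omega
    have e2 : PySem.List.pyGetD tab ((0 : Int) + (k : Int)) 0 = tab.getD k 0 := by
      rw [show ((0:Int) + (k:Int)) = ((k : Nat) : Int) by omega]
      simp [PySem.List.pyGetD_natCast]
    rw [e1, e2, ← List.contains_eq_any_beq]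
    simp
  rw [h1]
  unfold pvDupIdx
  match hn : tab.length with
  | 0 => simp
  | (m+1) =>
    have e3 : (((m+1 : Nat) : Int) - 1 - 0).toNat = m := by omega
    rw [e3, List.range_succ, List.countP_append]
    have : List.countP (fun k => decide (tab.getD k 0 ∈ tab.drop (k + 1))) [m] = 0 := by
      simp [List.drop_eq_nil_of_le (by omega : tab.length ≤ m + 1)]
    omega

theorem pvDupIdx_cons (h : Int) (t : List Int) :
    pvDupIdx (h :: t) = (if h ∈ t then 1 else 0) + pvDupIdx t := by
  unfold pvDupIdx
  rw [show (h :: t).length = t.length + 1 from rfl, List.range_succ_eq_map,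
    List.countP_cons, List.countP_map]
  have h1 : List.countP ((fun k => decide ((h :: t).getD k 0 ∈ (h :: t).drop (k + 1))) ∘ (· + 1))
      (List.range t.length)
      = List.countP (fun k => decide (t.getD k 0 ∈ t.drop (k + 1))) (List.range t.length) := by
    apply List.countP_congr
    intro k _
    rfl
  rw [h1]
  by_cases hm : h ∈ t <;> simp [hm] <;> omega
theorem pvDistinct_cons (h : Int) (t : List Int) :
    (PySem.Set.ofList (h :: t)).length =
      (if h ∈ t then (PySem.Set.ofList t).length else (PySem.Set.ofList t).length + 1) := by
  rw [PySem.Set.ofList_cons]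
  have hnd := PySem.Set.nodup_ofList (xs := t) (α := Int)
  have hperm : (PySem.Set.discard (PySem.Set.ofList t) h).Perm ((PySem.Set.ofList t).erase h) := by
    apply (List.perm_ext_iff_of_nodup (PySem.Set.nodup_discard _ h hnd) (hnd.erase h)).2
    intro x
    rw [PySem.Set.mem_discard, hnd.mem_erase_iff]
    tauto
  simp only [List.length_cons, hperm.length_eq, List.length_erase]
  by_cases hm : h ∈ t
  · have : h ∈ PySem.Set.ofList t := (PySem.Set.mem_ofList t h).2 hm
    have hpos : 0 < (PySem.Set.ofList t).length := List.length_pos_of_mem this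
    simp [hm, this]
    omega
  · have : h ∉ PySem.Set.ofList t := fun hc => hm ((PySem.Set.mem_ofList t h).1 hc)
    simp [hm, this]

theorem pvDupIdx_add_distinct (tab : List Int) :
    pvDupIdx tab + (PySem.Set.ofList tab).length = tab.length := by
  induction tab with
  | nil => rfl
  | cons h t ih =>
    rw [pvDupIdx_cons, pvDistinct_cons]
    by_cases hm : h ∈ t <;> simp [hm] <;> omega

theorem pvMain (tab : List Int) : doubDoublons tab = doubDoublons_alt tab := by
  simp only [doubDoublons, doubDoublons_alt]
  rw [PySem.List.foldl_congr_mem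
    (l := PySem.List.pyRange 0 ((tab.length : Int) - 1) 1)
    (f := fun st i => doubDoublonsInner tab i (PySem.List.pyRange (i + 1) (tab.length : Int) 1) st)
    (init := (false, (0 : Int)))
    (g := fun st i => if (tab.drop (i + 1).toNat).any (fun v => PySem.List.pyGetD tab i 0 == v)
                      then pvUpd st else st)
    (by
      intro acc x hx
      have hx0 : 0 ≤ x := ((PySem.List.mem_pyRange_one).1 hx).1
      exact pvInner_drop tab x (x + 1) (by omega) acc)]
  rw [pvFoldl_ite_upd, pvCount_eq_dupIdx, ]
  have hfst := pvIter_fst (pvDupIdx tab)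
  have hsum := pvDupIdx_add_distinct tab
  simp only [hfst]
  by_cases h2 : 2 ≤ pvDupIdx tab
  · simp only [h2, decide_true]
    have : (2 : Int) ≤ (tab.length : Int) - ((PySem.Set.ofList tab).length : Int) := by omega
    simp [this]
  · simp only [h2, decide_false]
    have : ¬ ((2 : Int) ≤ (tab.length : Int) - ((PySem.Set.ofList tab).length : Int)) := by omega
    simp [this]

-- ===== VERDICT (by name: the statement is the Claim_ definition above) =====
theorem doubDoublons_spec : Claim_equal_doubDoublons := by
  intro tab _
  unfold Spec_doubDoublons
  exact pvMain tab
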